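-- pv_equiv track=rewrite | github.com/S3nna13/Aurelius | src/serving/structured_output_decoder.py | _check_string_prefix
-- ===== SOURCE A (Python) =====
-- def _check_string_prefix(partial: str) -> bool:
--     """A valid string prefix must start with '"' and not contain an
--     unescaped closing '"' unless it is the very last character."""
--     p = partial.lstrip()
--     if not p:
--         return True
--     if p[0] != '"':
--         return False
--     # Walk through the string body to ensure no premature close.
--     i = 1
--     while i < len(p):
--         ch = p[i]
--         if ch == "\\":
--             i += 2  # skip escaped char
--             continue
--         if ch == '"':
--             # A closing quote is OK only if it is the last char
--             # (the string is complete) — any further content is invalid.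
--             return i == len(p) - 1
--         i += 1
--     # We reached end-of-partial while still inside the string body: valid prefix.
--     return True
-- ===== SOURCE B (Python) =====
-- def _check_string_prefix(partial: str) -> bool:
--     p = partial.lstrip()
--     if not p:
--         return True
--     if p[0] != '"':
--         return False
--     # Jump between quote occurrences with str.find instead of scanning every
--     # character: a quote closes the string iff the run of backslashes counted
--     # backwards from it (stopping before the opening quote) has even length.
--     j = p.find('"', 1)
--     while j != -1:
--         k = j
--         while k > 1 and p[k - 1] == "\\":
--             k -= 1
--         if (j - k) % 2 == 0:
--             return j == len(p) - 1
--         j = p.find('"', j + 1)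
--     return True
-- ===== Notes on version B (the rewrite author's own statement) =====
-- stated objective: alternative
-- what changed: Replaces A's forward character-by-character scan (with i += 2 escape skipping) by an outer loop that jumps directly between occurrences of the double-quote character via str.find and, at each one, counts the preceding backslash run backwards to decide whether that quote is escaped.
import Mathlib
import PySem

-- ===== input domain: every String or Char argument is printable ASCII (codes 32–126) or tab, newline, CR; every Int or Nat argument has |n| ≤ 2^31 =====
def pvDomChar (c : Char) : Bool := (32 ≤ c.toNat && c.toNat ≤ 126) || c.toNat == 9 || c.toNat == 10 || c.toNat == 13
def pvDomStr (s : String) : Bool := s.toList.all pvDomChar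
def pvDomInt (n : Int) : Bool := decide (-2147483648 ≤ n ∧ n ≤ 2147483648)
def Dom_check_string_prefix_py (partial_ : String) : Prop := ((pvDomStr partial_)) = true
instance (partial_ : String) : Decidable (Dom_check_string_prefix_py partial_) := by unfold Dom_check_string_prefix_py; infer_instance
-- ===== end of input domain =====

-- B jumps between quote occurrences via str.find and counts the backslash run backwards
-- from each quote, instead of A's forward char-by-char scan; objective: alternative.

-- ===== PORT A =====
-- A's while-loop over p from i = 1: state = the remaining suffix p[i:];
-- 'i += 2' = drop the backslash and one more char; 'i == len(p) - 1' = the tail after the quote is empty.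
def pvLoopA : List Char → Bool
  | [] => true
  | c :: rest =>
    if c = '\\' then pvLoopA (rest.drop 1)
    else if c = '"' then rest.isEmpty
    else pvLoopA rest
termination_by l => l.length
decreasing_by
  all_goals simp

def check_string_prefix_py (partial_ : String) : Bool :=
  let p := (PySem.Str.lstrip partial_).toList
  match p with
  | [] => true
  | c :: rest => if c ≠ '"' then false else pvLoopA rest

-- ===== PORT B =====
-- p.find('"', j): first index >= j holding '"', none for Python's -1
-- (hand port, exact for a single-character needle).
def pvFind (p : List Char) (j : Nat) : Option Nat :=
  if h : j < p.length then
    if p[j] = '"' then some j else pvFind p (j + 1)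
  else none
termination_by p.length - j
decreasing_by exact Nat.sub_succ_lt_self _ _ h

-- B's inner while-loop: k -= 1 while k > 1 and p[k-1] == '\\'
def pvRunStart (p : List Char) : Nat → Nat
  | 0 => 0
  | k + 1 => if 1 < k + 1 ∧ p[k]? = some '\\' then pvRunStart p k else k + 1

-- B's outer while-loop over successive find results; the fuel counter (one unit
-- per loop iteration, p.length units always suffice) only makes it structural.
def pvOuter (p : List Char) (j : Nat) : Nat → Bool
  | 0 => true
  | fuel + 1 =>
    match pvFind p j with
    | none => true
    | some j' =>
      let k := pvRunStart p j'
      if (j' - k) % 2 = 0 then decide (j' = p.length - 1)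
      else pvOuter p (j' + 1) fuel

def check_string_prefix_py_alt (partial_ : String) : Bool :=
  let p := (PySem.Str.lstrip partial_).toList
  match p with
  | [] => true
  | c :: _ => if c ≠ '"' then false else pvOuter p 1 p.length

-- ===== PRECONDITION & SPEC =====
def Spec_check_string_prefix_py (partial_ : String) (out : Bool) : Prop := out = check_string_prefix_py_alt partial_
instance (partial_ : String) (out : Bool) : Decidable (Spec_check_string_prefix_py partial_ out) := by unfold Spec_check_string_prefix_py; infer_instance

-- ===== CLAIM (what is proved, stated in full; the proofs are below) =====
def Claim_equal_check_string_prefix_py : Prop := ∀ (partial_ : String), Dom_check_string_prefix_py partial_ → Spec_check_string_prefix_py partial_ (check_string_prefix_py partial_)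

-- ===== LEMMAS AND PROOFS =====

-- Bridge: a forward scan carrying the current backslash-run parity.
def pvScan : List Char → Nat → Bool
  | [], _ => true
  | c :: rest, run =>
    if c = '"' ∧ run % 2 = 0 then rest.isEmpty
    else pvScan rest (if c = '\\' then run + 1 else 0)

theorem pvScan_parity (l : List Char) : ∀ r s : Nat, r % 2 = s % 2 → pvScan l r = pvScan l s := by
  induction l with
  | nil => intro r s _; rfl
  | cons c rest ih =>
    intro r s h
    simp only [pvScan, h]
    split
    · rfl
    · split_ifs with hb
      · exact ih _ _ (by omega)
      · rfl

-- A's suffix scan equals the parity scan (and one step behind it, with an odd run).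
theorem pvLoopA_eq_scan (l : List Char) : pvLoopA l = pvScan l 0 ∧ pvLoopA (l.drop 1) = pvScan l 1 := by
  induction l with
  | nil => constructor <;> simp [pvLoopA, pvScan]
  | cons c rest ih =>
    constructor
    · by_cases hb : c = '\\'
      · subst hb
        simp only [pvLoopA, pvScan]
        simp only [List.drop_one]
        simpa using ih.2
      · by_cases hq : c = '"'
        · subst hq; simp [pvLoopA, pvScan]
        · simp only [pvLoopA, pvScan]
          simp [hb, hq]
          exact ih.1
    · simp only [List.drop_one, List.tail_cons, pvScan]
      rw [if_neg (by simp : ¬(c = '"' ∧ (1 : Nat) % 2 = 0))]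
      by_cases hb : c = '\\'
      · rw [if_pos hb, ← pvScan_parity rest 0 (1 + 1) (by omega)]; exact ih.1
      · rw [if_neg hb]; exact ih.1

theorem pvRunStart_bounds (p : List Char) (k : Nat) :
    pvRunStart p k ≤ k ∧ (1 ≤ k → 1 ≤ pvRunStart p k) := by
  induction k with
  | zero => exact ⟨Nat.le_refl _, fun h => absurd h (by omega)⟩
  | succ k ih =>
    simp only [pvRunStart]
    split_ifs with hc
    · exact ⟨by have := ih.1; omega, fun _ => ih.2 (by omega)⟩
    · exact ⟨Nat.le_refl _, fun _ => by omega⟩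

-- stepping the run-start across one character
theorem pvRunStart_succ (p : List Char) (j : Nat) (hj : 1 ≤ j) :
    pvRunStart p (j + 1) = if p[j]? = some '\\' then pvRunStart p j else j + 1 := by
  simp only [pvRunStart]
  by_cases hb : p[j]? = some '\\'
  · rw [if_pos ⟨by omega, hb⟩, if_pos hb]
  · rw [if_neg (fun hc => hb hc.2), if_neg hb]

-- B's find-jumping loop computes the parity scan started at position j.
theorem pvOuter_eq_scan (p : List Char) : ∀ (fuel j g : Nat), p.length - j < fuel → fuel ≤ g → 1 ≤ j →
    pvOuter p j g = pvScan (p.drop j) (j - pvRunStart p j) := by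
  intro fuel
  induction fuel with
  | zero => intro j g hn _ _; exact absurd hn (by omega)
  | succ fuel ih =>
    intro j g hn hg hj
    cases g with
    | zero => exact absurd hg (by omega)
    | succ g =>
      by_cases hlt : j < p.length
      · by_cases hq : p[j] = '"'
        · -- a quote at j: find returns j itself
          have hfind : pvFind p j = some j := by rw [pvFind, dif_pos hlt, if_pos hq]
          simp only [pvOuter, hfind]
          rw [← List.getElem_cons_drop hlt, hq]
          simp only [pvScan]
          by_cases hpar : (j - pvRunStart p j) % 2 = 0
          · rw [if_pos hpar, if_pos (by simp [hpar])]
            refine Bool.eq_iff_iff.mpr ?_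
            simp only [decide_eq_true_eq, List.isEmpty_iff, List.drop_eq_nil_iff]
            omega
          · rw [if_neg hpar, if_neg (fun hc => hpar hc.2)]
            rw [ih (j + 1) g (by omega) (by omega) (by omega)]
            rw [pvRunStart_succ p j hj, if_neg (by simp [List.getElem?_eq_getElem hlt, hq])]
            simp
        · -- no quote at j: find skips to j+1, the scan steps the run
          have hfind : pvFind p j = pvFind p (j + 1) := by
            rw [pvFind, dif_pos hlt, if_neg hq]
          have houter : pvOuter p j (g + 1) = pvOuter p (j + 1) (g + 1) := by
            simp only [pvOuter]; rw [hfind]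
          rw [houter, ih (j + 1) (g + 1) (by omega) (by omega) (by omega)]
          rw [← List.getElem_cons_drop hlt]
          simp only [pvScan]
          rw [if_neg (fun hc => hq hc.1)]
          by_cases hb : p[j] = '\\'
          · rw [if_pos hb]
            rw [pvRunStart_succ p j hj, if_pos (by rw [List.getElem?_eq_getElem hlt, hb])]
            have hle := (pvRunStart_bounds p j).1
            congr 1
            omega
          · rw [if_neg hb]
            rw [pvRunStart_succ p j hj, if_neg (by simp [List.getElem?_eq_getElem hlt, hb])]
            simp
      · have hfind : pvFind p j = none := by rw [pvFind]; exact dif_neg hlt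
        rw [List.drop_eq_nil_of_le (by omega)]
        simp only [pvOuter, hfind]
        rfl

-- ===== VERDICT (by name: the statement is the Claim_ definition above) =====
theorem check_string_prefix_py_spec : Claim_equal_check_string_prefix_py := by
  intro partial_ _
  unfold Spec_check_string_prefix_py check_string_prefix_py check_string_prefix_py_alt
  cases h : (PySem.Str.lstrip partial_).toList with
  | nil => rfl
  | cons c rest =>
    simp only []
    split_ifs with hc
    · rfl
    · rw [pvOuter_eq_scan (c :: rest) (c :: rest).length 1 (c :: rest).length (by simp) (Nat.le_refl _) (Nat.le_refl _)]
      have hrs : pvRunStart (c :: rest) 1 = 1 := by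
        simp [pvRunStart]
      rw [hrs]
      simpa using (pvLoopA_eq_scan rest).1
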